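-- pv_equiv track=rewrite | github.com/nullptrz/FSD_Main_System | main.py | auto_select_ferry
-- ===== SOURCE A (Python) =====
-- def create_timeslot():
--     time_slot = []
--
--     for time in range(10, 18, 1):
--         time_slot.append((time - 9, time))
--
--     return time_slot
--
-- def create_schedule_penang(time_slot):
--     schedule_penang = []
--
--     for trip_penang in range(0, 8, 1):
--         schedule_penang.append(["Langkawi", "Penang", time_slot[trip_penang]])
--
--     return schedule_penang
--
-- def create_schedule_langkawi(time_slot):
--     schedule_langkawi = []
--
--     for trip_langkawi in range(0, 8, 1):
--         schedule_langkawi.append(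
--             ["Penang", "Langkawi", time_slot[trip_langkawi]])
--
--     return schedule_langkawi
--
-- def create_ferry_schedule(schedule_langkawi, schedule_penang):
--     ferry_schedule = {}
--
--     for item in range(0, 8, 1):
--         ferry_schedule['FERRY' + " " + str(item + 1)] = schedule_langkawi[item]
--         ferry_schedule['FERRY' + " " + str(item + 9)] = schedule_penang[item]
--
--     return ferry_schedule
--
-- def get_ferry_schedule():
--     ferry_schedule = create_ferry_schedule(create_schedule_langkawi(create_timeslot()),
--                                            create_schedule_penang(create_timeslot()))
--     return ferry_schedule
--
-- def auto_select_ferry(destination_choice, time_choice):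
--     ferry_schedule = get_ferry_schedule()
--     for ferry_id, schedule in ferry_schedule.items():
--         destination = schedule[1]
--         if destination_choice == destination:
--             time_slot = schedule[2]
--             for time in time_slot:
--                 if (time_choice == time):
--                     return ferry_id
-- ===== SOURCE B (Python) =====
-- def auto_select_ferry(destination_choice, time_choice):
--     # Compute the ferry id arithmetically: trip n (1..8) runs at times n and n+9;
--     # Langkawi-bound boats are FERRY 1..8, Penang-bound boats are FERRY 9..16.
--     for trip in range(1, 9):
--         if time_choice == trip or time_choice == trip + 9:
--             if destination_choice == 'Langkawi':
--                 return 'FERRY ' + str(trip)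
--             if destination_choice == 'Penang':
--                 return 'FERRY ' + str(trip + 8)
--     return None
-- ===== Notes on version B (the rewrite author's own statement) =====
-- stated objective: simpler
-- what changed: B drops the construction and dict-scan of the 16-entry ferry schedule and computes the ferry id directly from the arithmetic relation trip/trip+9 in a single 8-step loop.
import Mathlib
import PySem

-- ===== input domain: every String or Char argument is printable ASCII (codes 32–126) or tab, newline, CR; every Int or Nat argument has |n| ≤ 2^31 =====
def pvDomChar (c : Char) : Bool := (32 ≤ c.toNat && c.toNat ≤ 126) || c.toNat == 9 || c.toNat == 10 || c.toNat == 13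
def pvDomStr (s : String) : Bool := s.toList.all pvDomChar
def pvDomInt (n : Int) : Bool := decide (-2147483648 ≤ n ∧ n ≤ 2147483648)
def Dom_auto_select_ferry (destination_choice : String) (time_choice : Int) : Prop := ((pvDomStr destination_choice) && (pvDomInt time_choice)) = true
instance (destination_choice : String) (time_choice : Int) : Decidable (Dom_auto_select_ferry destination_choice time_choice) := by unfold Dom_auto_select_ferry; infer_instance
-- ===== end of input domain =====

-- B replaces A's built-and-scanned 16-entry schedule table with a direct arithmetic 8-step loop (simpler).


-- ===== PORT A =====
-- Python's heterogeneous schedule list ["origin", "destination", (t1, t2)] is ported as the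
-- triple String × String × (Int × Int); indexing schedule[1]/schedule[2] becomes .2.1/.2.2.

def create_timeslot : List (Int × Int) :=
  (PySem.List.pyRange 10 18 1).foldl (fun acc time => acc ++ [(time - 9, time)]) []

-- time_slot[trip]: the index is always in range here; the (0,0) default of getD is never used.
def create_schedule_penang (time_slot : List (Int × Int)) : List (String × String × (Int × Int)) :=
  (PySem.List.pyRange 0 8 1).foldl
    (fun acc trip_penang => acc ++ [("Langkawi", "Penang", (PySem.List.pyGet? time_slot trip_penang).getD (0, 0))]) []

def create_schedule_langkawi (time_slot : List (Int × Int)) : List (String × String × (Int × Int)) :=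
  (PySem.List.pyRange 0 8 1).foldl
    (fun acc trip_langkawi => acc ++ [("Penang", "Langkawi", (PySem.List.pyGet? time_slot trip_langkawi).getD (0, 0))]) []

def create_ferry_schedule (schedule_langkawi schedule_penang : List (String × String × (Int × Int))) :
    PySem.Dict String (String × String × (Int × Int)) :=
  (PySem.List.pyRange 0 8 1).foldl
    (fun d item =>
      (d.insert ("FERRY" ++ " " ++ PySem.Int.toStr (item + 1)) ((PySem.List.pyGet? schedule_langkawi item).getD ("", "", (0, 0)))).insert
        ("FERRY" ++ " " ++ PySem.Int.toStr (item + 9)) ((PySem.List.pyGet? schedule_penang item).getD ("", "", (0, 0))))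
    PySem.Dict.empty

def get_ferry_schedule : PySem.Dict String (String × String × (Int × Int)) :=
  create_ferry_schedule (create_schedule_langkawi create_timeslot) (create_schedule_penang create_timeslot)

-- the outer for-loop with early return; the inner loop iterates over the 2-tuple time_slot.
def auto_select_ferry_loop (destination_choice : String) (time_choice : Int) :
    List (String × (String × String × (Int × Int))) → Option String
  | [] => none
  | (ferry_id, schedule) :: rest =>
    if destination_choice = schedule.2.1 then
      if time_choice = schedule.2.2.1 then some ferry_id
      else if time_choice = schedule.2.2.2 then some ferry_id
      else auto_select_ferry_loop destination_choice time_choice rest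
    else auto_select_ferry_loop destination_choice time_choice rest

def auto_select_ferry (destination_choice : String) (time_choice : Int) : Option String :=
  auto_select_ferry_loop destination_choice time_choice get_ferry_schedule.items

-- ===== PORT B =====
def auto_select_ferry_alt_loop (destination_choice : String) (time_choice : Int) : List Int → Option String
  | [] => none
  | trip :: rest =>
    if time_choice = trip ∨ time_choice = trip + 9 then
      if destination_choice = "Langkawi" then some ("FERRY " ++ PySem.Int.toStr trip)
      else if destination_choice = "Penang" then some ("FERRY " ++ PySem.Int.toStr (trip + 8))
      else auto_select_ferry_alt_loop destination_choice time_choice rest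
    else auto_select_ferry_alt_loop destination_choice time_choice rest

def auto_select_ferry_alt (destination_choice : String) (time_choice : Int) : Option String :=
  auto_select_ferry_alt_loop destination_choice time_choice (PySem.List.pyRange 1 9 1)

-- ===== PRECONDITION & SPEC =====
def Spec_auto_select_ferry (destination_choice : String) (time_choice : Int) (out : Option String) : Prop := out = auto_select_ferry_alt destination_choice time_choice
instance (destination_choice : String) (time_choice : Int) (out : Option String) : Decidable (Spec_auto_select_ferry destination_choice time_choice out) := by unfold Spec_auto_select_ferry; infer_instance

-- ===== CLAIM (what is proved, stated in full; the proofs are below) =====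
def Claim_equal_auto_select_ferry : Prop := ∀ (destination_choice : String) (time_choice : Int), Dom_auto_select_ferry destination_choice time_choice → Spec_auto_select_ferry destination_choice time_choice (auto_select_ferry destination_choice time_choice)

-- ===== LEMMAS AND PROOFS =====
set_option maxHeartbeats 1000000 in
theorem sched_eval : get_ferry_schedule.items =
    [("FERRY 1", ("Penang", "Langkawi", (1, 10))), ("FERRY 9", ("Langkawi", "Penang", (1, 10))),
     ("FERRY 2", ("Penang", "Langkawi", (2, 11))), ("FERRY 10", ("Langkawi", "Penang", (2, 11))),
     ("FERRY 3", ("Penang", "Langkawi", (3, 12))), ("FERRY 11", ("Langkawi", "Penang", (3, 12))),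
     ("FERRY 4", ("Penang", "Langkawi", (4, 13))), ("FERRY 12", ("Langkawi", "Penang", (4, 13))),
     ("FERRY 5", ("Penang", "Langkawi", (5, 14))), ("FERRY 13", ("Langkawi", "Penang", (5, 14))),
     ("FERRY 6", ("Penang", "Langkawi", (6, 15))), ("FERRY 14", ("Langkawi", "Penang", (6, 15))),
     ("FERRY 7", ("Penang", "Langkawi", (7, 16))), ("FERRY 15", ("Langkawi", "Penang", (7, 16))),
     ("FERRY 8", ("Penang", "Langkawi", (8, 17))), ("FERRY 16", ("Langkawi", "Penang", (8, 17)))] := by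
  decide

theorem trips_eval : PySem.List.pyRange 1 9 1 = [1, 2, 3, 4, 5, 6, 7, 8] := by decide

theorem loopA_none (d : String) (t : Int) (l : List (String × (String × String × (Int × Int))))
    (h : ∀ p ∈ l, d ≠ p.2.2.1) : auto_select_ferry_loop d t l = none := by
  induction l with
  | nil => rfl
  | cons p rest ih =>
    simp only [auto_select_ferry_loop]
    rw [if_neg (h p (by simp))]
    exact ih fun q hq => h q (by simp [hq])

theorem loopA_none_t (d : String) (t : Int) (l : List (String × (String × String × (Int × Int))))
    (h : ∀ p ∈ l, t ≠ p.2.2.2.1 ∧ t ≠ p.2.2.2.2) : auto_select_ferry_loop d t l = none := by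
  induction l with
  | nil => rfl
  | cons p rest ih =>
    have ih' := ih fun q hq => h q (by simp [hq])
    obtain ⟨h1, h2⟩ := h p (by simp)
    simp only [auto_select_ferry_loop]
    by_cases hd : d = p.2.2.1
    · rw [if_pos hd, if_neg h1, if_neg h2]; exact ih'
    · rw [if_neg hd]; exact ih'

theorem loopB_none (d : String) (t : Int) (l : List Int)
    (hL : d ≠ "Langkawi") (hP : d ≠ "Penang") : auto_select_ferry_alt_loop d t l = none := by
  induction l with
  | nil => rfl
  | cons trip rest ih =>
    simp only [auto_select_ferry_alt_loop, if_neg hL, if_neg hP, ite_self]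
    exact ih

theorem loopB_none_t (d : String) (t : Int) (l : List Int)
    (h : ∀ x ∈ l, t ≠ x ∧ t ≠ x + 9) : auto_select_ferry_alt_loop d t l = none := by
  induction l with
  | nil => rfl
  | cons trip rest ih =>
    have ih' := ih fun q hq => h q (by simp [hq])
    obtain ⟨h1, h2⟩ := h trip (by simp)
    simp only [auto_select_ferry_alt_loop]
    rw [if_neg (by tauto)]
    exact ih'

-- ===== VERDICT (by name: the statement is the Claim_ definition above) =====
set_option maxHeartbeats 1000000 in
theorem auto_select_ferry_spec : Claim_equal_auto_select_ferry := by
  intro d t _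
  unfold Spec_auto_select_ferry auto_select_ferry auto_select_ferry_alt
  rw [sched_eval, trips_eval]
  by_cases hrange : 1 ≤ t ∧ t ≤ 17
  · obtain ⟨ha, hb⟩ := hrange
    by_cases hL : d = "Langkawi"
    · subst hL; interval_cases t <;> decide
    · by_cases hP : d = "Penang"
      · subst hP; interval_cases t <;> decide
      · rw [loopA_none d t _ (by intro p hp; fin_cases hp <;> simp_all),
          loopB_none d t _ hL hP]
  · rw [loopA_none_t d t _ (by intro p hp; fin_cases hp <;> constructor <;> simp <;> omega),
      loopB_none_t d t _ (by intro x hx; fin_cases hx <;> constructor <;> omega)]
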